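-- pv_equiv track=rewrite | github.com/nbraunsc/Fragments | src/runpie.py | runpie
-- ===== SOURCE A (Python) =====
-- def recurse(f_old, start, derivs, fraglist, signlist, sign):    #1st depth and on, finding intersection
--     for fj in range(start, len(fraglist)):
--         if fj > start:
--             df_new = fraglist[fj].intersection(f_old)
--             if len(df_new) > 0:
--                 derivs.append(df_new)
--                 df_newcoeff = sign * -1
--                 signlist.append(df_newcoeff)
--                 recurse(df_new, fj, derivs, fraglist, signlist, df_newcoeff)
--
-- def runpie(fraglist):
--     derivs = []
--     signlist = []
--     for fi in range(0, len(fraglist)):  #0th depth, just initial frags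
--         dfi = fraglist[fi]
--         dfi_coeff = 1
--         derivs.append(dfi)
--         signlist.append(dfi_coeff)
--         recurse(fraglist[fi], fi, derivs, fraglist, signlist, dfi_coeff)
--     return derivs, signlist
-- ===== SOURCE B (Python) =====
-- def runpie(fraglist):
--     n = len(fraglist)
--     derivs = []
--     signlist = []
--     stack = []
--     for fi in range(n - 1, -1, -1):
--         stack.append((fraglist[fi], fi, 1))
--     while stack:
--         s, i, sign = stack.pop()
--         derivs.append(s)
--         signlist.append(sign)
--         for fj in range(n - 1, i, -1):
--             df = fraglist[fj] & s
--             if df: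
--                 stack.append((df, fj, -sign))
--     return derivs, signlist
-- ===== Notes on version B (the rewrite author's own statement) =====
-- stated objective: alternative
-- what changed: Replaces the recursive helper `recurse` (DFS by function recursion with shared mutable accumulator lists) by a single iterative loop over an explicit stack of (set, index, sign) frames, pushing children in reverse so pop order reproduces the same pre-order emission.
import Mathlib
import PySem

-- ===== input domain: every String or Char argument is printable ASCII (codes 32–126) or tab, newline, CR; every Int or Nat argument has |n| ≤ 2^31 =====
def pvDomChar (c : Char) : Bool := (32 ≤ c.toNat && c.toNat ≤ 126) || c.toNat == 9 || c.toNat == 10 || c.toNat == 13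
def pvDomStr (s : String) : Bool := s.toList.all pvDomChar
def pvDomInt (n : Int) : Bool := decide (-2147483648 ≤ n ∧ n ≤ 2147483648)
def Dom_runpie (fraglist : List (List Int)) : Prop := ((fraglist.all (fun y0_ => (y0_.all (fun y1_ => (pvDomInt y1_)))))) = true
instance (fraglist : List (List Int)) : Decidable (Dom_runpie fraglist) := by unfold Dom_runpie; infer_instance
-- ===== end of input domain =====

-- B replaces A's recursive `recurse` helper by one iterative loop over an explicit
-- stack of (set, index, sign) frames (alternative decomposition, same cost).

-- ===== PORT A =====
-- `recurse(f_old, start, …, sign)`: the loop `for fj in range(start, len(fraglist))`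
-- is the recursion on fj below; the function returns the pair of lists the Python
-- appends to the shared `derivs`/`signlist` accumulators, in emission order.
def loopA (fl : List (List Int)) (fOld : List Int) (start fj : Nat) (sign : Int) :
    List (List Int) × List Int :=
  if h : fj < fl.length then
    if hgt : fj > start then
      let df := PySem.Set.inter (PySem.List.pyGetD fl (Int.ofNat fj) []) fOld
      if hne : df ≠ [] then
        let sub := loopA fl df fj (fj + 1) (sign * -1)
        let tail := loopA fl fOld start (fj + 1) sign
        (df :: (sub.1 ++ tail.1), (sign * -1) :: (sub.2 ++ tail.2))
      else loopA fl fOld start (fj + 1) sign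
    else loopA fl fOld start (fj + 1) sign
  else ([], [])
termination_by (fl.length - start, fl.length - fj)
decreasing_by
  · exact Prod.Lex.left _ _ (by omega)
  · exact Prod.Lex.right _ (by omega)
  · exact Prod.Lex.right _ (by omega)
  · exact Prod.Lex.right _ (by omega)

def runpie (fraglist : List (List Int)) : List (List Int) × List Int :=
  (List.range fraglist.length).foldl
    (fun acc fi =>
      let dfi := PySem.List.pyGetD fraglist (Int.ofNat fi) []
      let r := loopA fraglist dfi fi fi 1
      (acc.1 ++ dfi :: r.1, acc.2 ++ (1 : Int) :: r.2))
    ([], [])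

-- ===== PORT B =====
-- a stack frame (running set, start index, sign); head of the list = top of stack
def fmeas (n : Nat) (f : List Int × Nat × Int) : Nat := 2 ^ (n - f.2.1)
def smeas (n : Nat) (st : List (List Int × Nat × Int)) : Nat := (st.map (fmeas n)).sum

-- `for fj in range(n-1, i, -1): … stack.append(…)`: folding over the reversed
-- ascending range and prepending is exactly pushing in descending fj order.
def pushChildren (fl : List (List Int)) (s : List Int) (i : Nat) (sg : Int)
    (st : List (List Int × Nat × Int)) : List (List Int × Nat × Int) :=
  ((List.range' (i + 1) (fl.length - (i + 1))).reverse).foldl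
    (fun st fj =>
      let df := PySem.Set.inter (PySem.List.pyGetD fl (Int.ofNat fj) []) s
      if df = [] then st else (df, fj, -sg) :: st)
    st

theorem pushChildren_meas (fl : List (List Int)) (s : List Int) (i : Nat) (sg : Int)
    (st : List (List Int × Nat × Int)) :
    smeas fl.length (pushChildren fl s i sg st) <
      2 ^ (fl.length - i) + smeas fl.length st := by
  have key : ∀ (js : List Nat) (st : List (List Int × Nat × Int)),
      smeas fl.length (js.foldl
        (fun st fj =>
          let df := PySem.Set.inter (PySem.List.pyGetD fl (Int.ofNat fj) []) s
          if df = [] then st else (df, fj, -sg) :: st) st) ≤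
      (js.map (fun j => 2 ^ (fl.length - j))).sum + smeas fl.length st := by
    intro js
    induction js with
    | nil => intro st; simp
    | cons j t ih =>
      intro st
      rw [List.foldl_cons]
      refine le_trans (ih _) ?_
      simp only [List.map_cons, List.sum_cons]
      have hstep : smeas fl.length
          (if PySem.Set.inter (PySem.List.pyGetD fl (Int.ofNat j) []) s = [] then st
           else (PySem.Set.inter (PySem.List.pyGetD fl (Int.ofNat j) []) s, j, -sg) :: st) ≤
          2 ^ (fl.length - j) + smeas fl.length st := by
        by_cases hdf : PySem.Set.inter (PySem.List.pyGetD fl (Int.ofNat j) []) s = []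
        · rw [if_pos hdf]; exact Nat.le_add_left _ _
        · rw [if_neg hdf]
          simp only [smeas, List.map_cons, List.sum_cons, fmeas]
          omega
      refine le_trans (Nat.add_le_add_left hstep _) (by omega)
  have geo : ∀ (k a : Nat), a + k = fl.length →
      ((List.range' a k).map (fun j => 2 ^ (fl.length - j))).sum = 2 ^ (k + 1) - 2 := by
    intro k
    induction k with
    | zero => intro a _; simp
    | succ k ih =>
      intro a ha
      rw [List.range'_succ]
      simp only [List.map_cons, List.sum_cons]
      rw [ih (a + 1) (by omega)]
      have h1 : fl.length - a = k + 1 := by omega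
      rw [h1]
      have h2 : 2 ≤ 2 ^ (k + 1) := by
        calc (2:Nat) = 2 ^ 1 := rfl
        _ ≤ 2 ^ (k + 1) := Nat.pow_le_pow_right (by norm_num) (by omega)
      rw [pow_succ]
      omega
  refine lt_of_le_of_lt (key ((List.range' (i + 1) (fl.length - (i + 1))).reverse) st) ?_
  rw [List.map_reverse, List.sum_reverse]
  by_cases hi : i + 1 ≤ fl.length
  · rw [geo (fl.length - (i + 1)) (i + 1) (by omega)]
    have h1 : fl.length - (i + 1) + 1 = fl.length - i := by omega
    rw [h1]
    have : 0 < 2 ^ (fl.length - i) := pow_pos (by norm_num : (0:Nat) < 2) _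
    omega
  · have h0 : fl.length - (i + 1) = 0 := by omega
    rw [h0]
    simp only [List.range'_zero, List.map_nil, List.sum_nil, Nat.zero_add]
    have : 0 < 2 ^ (fl.length - i) := pow_pos (by norm_num : (0:Nat) < 2) _
    omega

-- `while stack: s, i, sign = stack.pop(); derivs.append(s); signlist.append(sign); <push children>`
def runStack (fl : List (List Int)) (stack : List (List Int × Nat × Int))
    (derivs : List (List Int)) (signs : List Int) : List (List Int) × List Int :=
  match stack with
  | [] => (derivs, signs)
  | (s, i, sg) :: rest =>
      runStack fl (pushChildren fl s i sg rest) (derivs ++ [s]) (signs ++ [sg])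
termination_by smeas fl.length stack
decreasing_by
  have := pushChildren_meas fl s i sg rest
  simp only [smeas, List.map_cons, List.sum_cons, fmeas] at *
  omega

def runpie_alt (fraglist : List (List Int)) : List (List Int) × List Int :=
  let seed := ((List.range fraglist.length).reverse).foldl
    (fun st fi => (PySem.List.pyGetD fraglist (Int.ofNat fi) [], fi, (1 : Int)) :: st) []
  runStack fraglist seed [] []

-- ===== PRECONDITION & SPEC =====
def Spec_runpie (fraglist : List (List Int)) (out : List (List Int) × List Int) : Prop := out = runpie_alt fraglist
instance (fraglist : List (List Int)) (out : List (List Int) × List Int) : Decidable (Spec_runpie fraglist out) := by unfold Spec_runpie; infer_instance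

-- ===== CLAIM (what is proved, stated in full; the proofs are below) =====
def Claim_equal_runpie : Prop := ∀ (fraglist : List (List Int)), Dom_runpie fraglist → Spec_runpie fraglist (runpie fraglist)

-- ===== LEMMAS AND PROOFS =====

-- pairwise concatenation of (derivs, signs) pairs and its sum over a list of frames
def pcat (a b : List (List Int) × List Int) : List (List Int) × List Int :=
  (a.1 ++ b.1, a.2 ++ b.2)

-- what A emits for the subtree rooted at frame (s, i, sg)
def subT (fl : List (List Int)) (s : List Int) (i : Nat) (sg : Int) :
    List (List Int) × List Int :=
  (s :: (loopA fl s i i sg).1, sg :: (loopA fl s i i sg).2)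

def psum (l : List (List Int × Nat × Int)) (fl : List (List Int)) :
    List (List Int) × List Int :=
  l.foldr (fun f b => pcat (subT fl f.1 f.2.1 f.2.2) b) ([], [])

theorem loopA_ge (fl : List (List Int)) (s : List Int) (start fj : Nat) (sg : Int)
    (h : fl.length ≤ fj) : loopA fl s start fj sg = ([], []) := by
  rw [loopA]; simp [Nat.not_lt.mpr h]

theorem loopA_skip (fl : List (List Int)) (s : List Int) (start fj : Nat) (sg : Int)
    (h : fj ≤ start) : loopA fl s start fj sg = loopA fl s start (fj + 1) sg := by
  by_cases hlt : fj < fl.length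
  · rw [loopA]; simp [hlt, Nat.not_lt.mpr h]
  · rw [loopA_ge fl s start fj sg (by omega), loopA_ge fl s start (fj + 1) sg (by omega)]

def childFun (fl : List (List Int)) (s : List Int) (sg : Int) (j : Nat) :
    Option (List Int × Nat × Int) :=
  let df := PySem.Set.inter (PySem.List.pyGetD fl (Int.ofNat j) []) s
  if df = [] then none else some (df, j, -sg)

theorem pushChildren_eq (fl : List (List Int)) (s : List Int) (i : Nat) (sg : Int)
    (st : List (List Int × Nat × Int)) :
    pushChildren fl s i sg st =
      (List.range' (i + 1) (fl.length - (i + 1))).filterMap (childFun fl s sg) ++ st := by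
  have key : ∀ (js : List Nat) (st : List (List Int × Nat × Int)),
      (js.reverse).foldl
        (fun st fj =>
          let df := PySem.Set.inter (PySem.List.pyGetD fl (Int.ofNat fj) []) s
          if df = [] then st else (df, fj, -sg) :: st) st =
      js.filterMap (childFun fl s sg) ++ st := by
    intro js
    induction js with
    | nil => intro st; simp
    | cons j t ih =>
      intro st
      simp only [List.reverse_cons, List.foldl_append, List.foldl_cons, List.foldl_nil, ih]
      by_cases hdf : PySem.Set.inter (PySem.List.pyGetD fl (Int.ofNat j) []) s = []
      · rw [List.filterMap_cons_none (by simp only [childFun]; rw [if_pos hdf])]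
        exact if_pos hdf
      · rw [List.filterMap_cons_some (by simp only [childFun]; rw [if_neg hdf])]
        exact if_neg hdf
  exact key _ st

theorem psum_append (fl : List (List Int)) (l1 l2 : List (List Int × Nat × Int)) :
    psum (l1 ++ l2) fl = pcat (psum l1 fl) (psum l2 fl) := by
  induction l1 with
  | nil => simp [psum, pcat]
  | cons f t ih =>
    simp only [List.cons_append, psum, List.foldr_cons] at *
    rw [ih]
    simp [pcat, List.append_assoc]

theorem children_loop (fl : List (List Int)) (s : List Int) (i : Nat) (sg : Int) :
    ∀ (k fj : Nat), fj + k = fl.length → i < fj →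
      psum ((List.range' fj k).filterMap (childFun fl s sg)) fl = loopA fl s i fj sg := by
  intro k
  induction k with
  | zero =>
    intro fj hk _
    rw [loopA_ge fl s i fj sg (by omega)]
    simp [psum]
  | succ k ih =>
    intro fj hk hi
    have hlt : fj < fl.length := by omega
    rw [List.range'_succ]
    by_cases hdf : PySem.Set.inter (PySem.List.pyGetD fl (Int.ofNat fj) []) s = []
    · rw [List.filterMap_cons_none (by simp only [childFun]; rw [if_pos hdf])]
      rw [ih (fj + 1) (by omega) (by omega)]
      conv_rhs => rw [loopA]
      rw [dif_pos hlt, dif_pos (show fj > i from hi), dif_neg (not_not_intro hdf)]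
    · rw [List.filterMap_cons_some (by simp only [childFun]; rw [if_neg hdf])]
      rw [show psum ((PySem.Set.inter (PySem.List.pyGetD fl (Int.ofNat fj) []) s, fj, -sg) ::
            (List.range' (fj + 1) k).filterMap (childFun fl s sg)) fl =
          pcat (subT fl (PySem.Set.inter (PySem.List.pyGetD fl (Int.ofNat fj) []) s) fj (-sg))
            (psum ((List.range' (fj + 1) k).filterMap (childFun fl s sg)) fl) from rfl]
      rw [ih (fj + 1) (by omega) (by omega)]
      conv_rhs => rw [loopA]
      rw [dif_pos hlt, dif_pos (show fj > i from hi), dif_pos hdf]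
      rw [subT, pcat]
      rw [loopA_skip fl _ fj fj (-sg) (le_refl fj)]
      have hsg : sg * -1 = -sg := by ring
      simp [hsg]

theorem runStack_frames (fl : List (List Int)) :
    ∀ (m : Nat) (frames : List (List Int × Nat × Int)), smeas fl.length frames ≤ m →
    ∀ (rest : List (List Int × Nat × Int)) (d : List (List Int)) (sgl : List Int),
      runStack fl (frames ++ rest) d sgl =
        runStack fl rest (d ++ (psum frames fl).1) (sgl ++ (psum frames fl).2) := by
  intro m
  induction m with
  | zero =>
    intro frames hm rest d sgl
    have hnil : frames = [] := by
      cases frames with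
      | nil => rfl
      | cons f t =>
        exfalso
        have hpos : 0 < fmeas fl.length f := pow_pos (by norm_num : (0:Nat) < 2) _
        simp [smeas] at hm
        omega
    subst hnil; simp [psum]
  | succ m ih =>
    intro frames hm rest d sgl
    cases frames with
    | nil => simp [psum]
    | cons f t =>
      obtain ⟨s, i, sg⟩ := f
      rw [List.cons_append, runStack, pushChildren_eq, ← List.append_assoc]
      have hcl : smeas fl.length
          ((List.range' (i + 1) (fl.length - (i + 1))).filterMap (childFun fl s sg)) <
          2 ^ (fl.length - i) := by
        have h := pushChildren_meas fl s i sg []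
        rw [pushChildren_eq] at h
        simpa [smeas] using h
      have hmeas : smeas fl.length
          ((List.range' (i + 1) (fl.length - (i + 1))).filterMap (childFun fl s sg) ++ t) ≤ m := by
        simp only [smeas, List.map_append, List.sum_append] at *
        simp only [List.map_cons, List.sum_cons] at hm
        have hb : fmeas fl.length (s, i, sg) = 2 ^ (fl.length - i) := rfl
        omega
      rw [ih _ hmeas rest]
      have hchild : psum ((List.range' (i + 1) (fl.length - (i + 1))).filterMap (childFun fl s sg)) fl
          = loopA fl s i i sg := by
        by_cases hi : i + 1 ≤ fl.length
        · rw [children_loop fl s i sg (fl.length - (i + 1)) (i + 1) (by omega) (by omega)]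
          exact (loopA_skip fl s i i sg (le_refl i)).symm
        · have h0 : fl.length - (i + 1) = 0 := by omega
          rw [h0, loopA_ge fl s i i sg (by omega)]
          simp [psum]
      rw [psum_append, hchild]
      rw [show psum ((s, i, sg) :: t) fl = pcat (subT fl s i sg) (psum t fl) from rfl]
      simp [pcat, subT, List.append_assoc]

theorem runpie_eq_psum (fl : List (List Int)) :
    runpie fl = psum ((List.range fl.length).map
      (fun fi => (PySem.List.pyGetD fl (Int.ofNat fi) [], fi, (1 : Int)))) fl := by
  unfold runpie
  have key : ∀ (l : List Nat) (d : List (List Int)) (sgl : List Int),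
      l.foldl (fun acc fi =>
        let dfi := PySem.List.pyGetD fl (Int.ofNat fi) []
        let r := loopA fl dfi fi fi 1
        (acc.1 ++ dfi :: r.1, acc.2 ++ (1 : Int) :: r.2)) (d, sgl) =
      (d ++ (psum (l.map (fun fi => (PySem.List.pyGetD fl (Int.ofNat fi) [], fi, (1 : Int)))) fl).1,
       sgl ++ (psum (l.map (fun fi => (PySem.List.pyGetD fl (Int.ofNat fi) [], fi, (1 : Int)))) fl).2) := by
    intro l
    induction l with
    | nil => intro d sgl; simp [psum]
    | cons fi t ih =>
      intro d sgl
      simp only [List.foldl_cons, ih, List.map_cons]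
      rw [show psum ((PySem.List.pyGetD fl (Int.ofNat fi) [], fi, (1 : Int)) ::
            t.map (fun fi => (PySem.List.pyGetD fl (Int.ofNat fi) [], fi, (1 : Int)))) fl
          = pcat (subT fl (PySem.List.pyGetD fl (Int.ofNat fi) []) fi 1)
              (psum (t.map (fun fi => (PySem.List.pyGetD fl (Int.ofNat fi) [], fi, (1 : Int)))) fl) from rfl]
      simp [pcat, subT, List.append_assoc]
  have := key (List.range fl.length) [] []
  simpa using this

theorem seed_eq (fl : List (List Int)) :
    ((List.range fl.length).reverse).foldl
      (fun st fi => (PySem.List.pyGetD fl (Int.ofNat fi) [], fi, (1 : Int)) :: st) [] =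
    (List.range fl.length).map (fun fi => (PySem.List.pyGetD fl (Int.ofNat fi) [], fi, (1 : Int))) := by
  have key : ∀ (js : List Nat) (st : List (List Int × Nat × Int)),
      (js.reverse).foldl (fun st fi => (PySem.List.pyGetD fl (Int.ofNat fi) [], fi, (1 : Int)) :: st) st =
      js.map (fun fi => (PySem.List.pyGetD fl (Int.ofNat fi) [], fi, (1 : Int))) ++ st := by
    intro js
    induction js with
    | nil => intro st; simp
    | cons j t ih =>
      intro st
      simp [List.reverse_cons, List.foldl_append, ih]
  simpa using key (List.range fl.length) []

-- ===== VERDICT (by name: the statement is the Claim_ definition above) =====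
theorem runpie_spec : Claim_equal_runpie := by
  intro fl _
  unfold Spec_runpie
  rw [runpie_eq_psum]
  unfold runpie_alt
  rw [seed_eq]
  have := runStack_frames fl (smeas fl.length
      ((List.range fl.length).map (fun fi => (PySem.List.pyGetD fl (Int.ofNat fi) [], fi, (1 : Int)))))
      _ (le_refl _) [] [] []
  simp only [List.append_nil] at this
  rw [this]
  rw [runStack]
  simp
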